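-- pv_equiv track=rewrite | github.com/RomeroLab/PU-learning-paper-analysis | data/DXS/chimera_blocks_to_AA_sequences.py | generate_chimera_seqs
-- ===== SOURCE A (Python) =====
-- def generate_chimera_seqs(parents,blocks):
--     parents = [str(p) for p in range(1,parents+1)]
--     seqs = ['']
--     for i in range(blocks):
--         ns = []
--         for s in seqs:
--             for p in parents:
--                 ns.append(s+p)
--         seqs = ns
--     return seqs
-- ===== SOURCE B (Python) =====
-- def generate_chimera_seqs(parents, blocks):
--     plist = [str(p) for p in range(1, parents + 1)]
--     n = len(plist)
--     b = max(blocks, 0)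
--     out = []
--     for i in range(n ** b):
--         s = ''
--         x = i
--         for _ in range(b):
--             s = plist[x % n] + s
--             x //= n
--         out.append(s)
--     return out
-- ===== Notes on version B (the rewrite author's own statement) =====
-- stated objective: alternative
-- what changed: B replaces A's layer-by-layer list growth (rebuilding the whole sequence list once per block) with direct arithmetic enumeration: it iterates a single index i over range(n**blocks) and decodes i into base-n digits to build each string.
import Mathlib
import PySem

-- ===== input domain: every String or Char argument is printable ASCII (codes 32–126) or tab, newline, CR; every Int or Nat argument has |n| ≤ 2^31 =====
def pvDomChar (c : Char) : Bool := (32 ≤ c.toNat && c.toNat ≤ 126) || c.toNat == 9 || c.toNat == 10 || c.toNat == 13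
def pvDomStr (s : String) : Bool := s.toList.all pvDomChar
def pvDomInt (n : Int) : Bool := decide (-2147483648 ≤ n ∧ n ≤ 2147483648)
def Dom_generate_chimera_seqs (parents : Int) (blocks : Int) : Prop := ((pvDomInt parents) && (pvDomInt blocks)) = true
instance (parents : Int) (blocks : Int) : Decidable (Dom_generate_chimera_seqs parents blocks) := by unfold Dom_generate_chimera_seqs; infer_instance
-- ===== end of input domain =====

-- B replaces A's layer-by-layer list growth with arithmetic base-n decoding of a running index
-- (same output, same order); objective: alternative decomposition, not claimed faster.

-- ===== PORT A =====
def generate_chimera_seqs (parents : Int) (blocks : Int) : List String :=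
  let parentsL : List String := (PySem.List.pyRange 1 (parents + 1) 1).map (fun p => PySem.Int.toStr p)
  (PySem.List.pyRange 0 blocks 1).foldl
    (fun seqs _i =>
      seqs.foldl (fun ns s => parentsL.foldl (fun ns p => ns ++ [s ++ p]) ns) [])
    [""]

-- ===== PORT B =====
def generate_chimera_seqs_alt (parents : Int) (blocks : Int) : List String :=
  let plist : List String := (PySem.List.pyRange 1 (parents + 1) 1).map (fun p => PySem.Int.toStr p)
  let n : Int := PySem.List.len plist
  let b : Int := max blocks 0
  (PySem.List.pyRange 0 (n ^ b.toNat) 1).foldl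
    (fun out i =>
      let sx :=
        (PySem.List.pyRange 0 b 1).foldl
          (fun (sx : String × Int) _j =>
            (PySem.List.pyGetD plist (PySem.Int.mod sx.2 n) "" ++ sx.1,
             PySem.Int.floordiv sx.2 n))
          ("", i)
      out ++ [sx.1])
    []

-- ===== PRECONDITION & SPEC =====
def Spec_generate_chimera_seqs (parents : Int) (blocks : Int) (out : List String) : Prop := out = generate_chimera_seqs_alt parents blocks
instance (parents : Int) (blocks : Int) (out : List String) : Decidable (Spec_generate_chimera_seqs parents blocks out) := by unfold Spec_generate_chimera_seqs; infer_instance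

-- ===== CLAIM (what is proved, stated in full; the proofs are below) =====
def Claim_equal_generate_chimera_seqs : Prop := ∀ (parents : Int) (blocks : Int), Dom_generate_chimera_seqs parents blocks → Spec_generate_chimera_seqs parents blocks (generate_chimera_seqs parents blocks)

-- ===== LEMMAS AND PROOFS =====

-- A's one growth step: append every parent string to every sequence so far.
def pvStep (ps : List String) (seqs : List String) : List String :=
  seqs.flatMap (fun s => ps.map (fun p => s ++ p))

-- A's result after b steps.
def pvLayers (ps : List String) : Nat → List String
  | 0 => [""]
  | b + 1 => pvStep ps (pvLayers ps b)

-- B's base-n decoding of index x into b blocks (least-significant digit rightmost).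
def pvDec (ps : List String) : Nat → Nat → String
  | 0, _ => ""
  | b + 1, x => pvDec ps b (x / ps.length) ++ ps.getD (x % ps.length) ""

theorem pvFoldl_const {α : Type} (f : α → α) :
    ∀ (l : List Int) (init : α), l.foldl (fun s _ => f s) init = f^[l.length] init := by
  intro l
  induction l with
  | nil => intro init; rfl
  | cons x xs ih =>
    intro init
    simp [List.foldl_cons, ih, Function.iterate_succ_apply]

theorem pvIterate_layers (ps : List String) :
    ∀ b : Nat, (pvStep ps)^[b] [""] = pvLayers ps b := by
  intro b
  induction b with
  | zero => rfl
  | succ b ih => rw [Function.iterate_succ_apply', ih]; rfl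

-- A's port computes pvLayers.
theorem pvA_eq_layers (parents blocks : Int) :
    generate_chimera_seqs parents blocks =
      pvLayers ((PySem.List.pyRange 1 (parents + 1) 1).map (fun p => PySem.Int.toStr p)) blocks.toNat := by
  simp only [generate_chimera_seqs]
  have hbody : ∀ seqs : List String,
      seqs.foldl (fun ns s =>
        ((PySem.List.pyRange 1 (parents + 1) 1).map (fun p => PySem.Int.toStr p)).foldl
          (fun ns p => ns ++ [s ++ p]) ns) [] =
      pvStep ((PySem.List.pyRange 1 (parents + 1) 1).map (fun p => PySem.Int.toStr p)) seqs := by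
    intro seqs
    simp only [PySem.List.foldl_append_singleton_eq_map,
      PySem.List.foldl_append_eq_flatMap, List.nil_append]
    rfl
  simp only [hbody]
  rw [pvFoldl_const, PySem.List.length_pyRange_one, pvIterate_layers]
  norm_num

-- B's inner loop computes pvDec.
theorem pvRunStep (ps : List String) (b : Nat) :
    ∀ (x : Nat) (s : String),
      ((fun (sx : String × Int) =>
          (PySem.List.pyGetD ps (PySem.Int.mod sx.2 ((ps.length : Nat) : Int)) "" ++ sx.1,
           PySem.Int.floordiv sx.2 ((ps.length : Nat) : Int)))^[b] (s, (x : Int))).1 =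
        pvDec ps b x ++ s := by
  induction b with
  | zero =>
    intro x s
    simp [pvDec]
  | succ b ih =>
    intro x s
    rw [Function.iterate_succ_apply]
    simp only [PySem.Int.mod_natCast, PySem.Int.floordiv_natCast, PySem.List.pyGetD_natCast]
    rw [ih]
    simp [pvDec, List.getD, String.append_assoc]

-- B's port computes the decoded indices in order.
theorem pvB_eq_map_dec (parents blocks : Int) :
    generate_chimera_seqs_alt parents blocks =
      (List.range (((PySem.List.pyRange 1 (parents + 1) 1).map (fun p => PySem.Int.toStr p)).length ^ blocks.toNat)).map
        (fun k => pvDec ((PySem.List.pyRange 1 (parents + 1) 1).map (fun p => PySem.Int.toStr p)) blocks.toNat k) := by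
  simp only [generate_chimera_seqs_alt, PySem.List.len_eq]
  set ps := (PySem.List.pyRange 1 (parents + 1) 1).map (fun p => PySem.Int.toStr p) with hps
  have hmax : (max blocks 0).toNat = blocks.toNat := by omega
  have htot : ((ps.length : Int)) ^ (max blocks 0).toNat = ((ps.length ^ blocks.toNat : Nat) : Int) := by
    rw [hmax]; push_cast; ring
  rw [htot, PySem.List.pyRange_zero_nat, List.foldl_map,
    PySem.List.foldl_append_singleton_eq_map]
  simp only [List.nil_append]
  apply List.map_congr_left
  intro k _
  rw [pvFoldl_const, PySem.List.length_pyRange_one]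
  have hb : (max blocks 0 - 0).toNat = blocks.toNat := by omega
  rw [hb, pvRunStep]
  exact String.append_empty

theorem pvRange_mul (a n : Nat) :
    List.range (a * n) = (List.range a).flatMap (fun q => (List.range n).map (fun r => q * n + r)) := by
  induction a with
  | zero => simp
  | succ a ih =>
    rw [Nat.succ_mul, List.range_add, ih, List.range_succ, List.flatMap_append]
    simp

theorem pvMap_eq_range {f : String → String} (ps : List String) :
    ps.map f = (List.range ps.length).map (fun r => f (ps.getD r "")) := by
  apply List.ext_getElem
  · simp
  · intro i h1 h2
    simp [List.getD_eq_getElem?_getD, List.getElem?_eq_getElem (by simpa using h2)]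

-- The crux: layer-by-layer growth enumerates exactly the base-n decodings in order.
theorem pvLayers_eq_map_dec (ps : List String) :
    ∀ b : Nat, pvLayers ps b = (List.range (ps.length ^ b)).map (fun k => pvDec ps b k) := by
  intro b
  induction b with
  | zero => simp [pvLayers, pvDec, List.range_one]
  | succ b ih =>
    show pvStep ps (pvLayers ps b) = _
    rw [ih, pow_succ, pvRange_mul]
    unfold pvStep
    rw [List.flatMap_map, List.map_flatMap]
    refine congrArg (fun f => (List.range (ps.length ^ b)).flatMap f) (funext fun q => ?_)
    rw [pvMap_eq_range (f := fun p => pvDec ps b q ++ p), List.map_map]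
    apply List.map_congr_left
    intro r hr
    have hrlt : r < ps.length := List.mem_range.mp hr
    have hL : 0 < ps.length := Nat.lt_of_le_of_lt (Nat.zero_le _) hrlt
    simp only [Function.comp, pvDec]
    have hdiv : (q * ps.length + r) / ps.length = q := by
      rw [Nat.mul_comm, Nat.mul_add_div hL, Nat.div_eq_of_lt hrlt]
      omega
    have hmod : (q * ps.length + r) % ps.length = r := by
      rw [Nat.add_mod, Nat.mul_mod_left]
      simp [Nat.mod_eq_of_lt hrlt]
    rw [hdiv, hmod]

-- ===== VERDICT (by name: the statement is the Claim_ definition above) =====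
theorem generate_chimera_seqs_spec : Claim_equal_generate_chimera_seqs := by
  intro parents blocks _
  unfold Spec_generate_chimera_seqs
  rw [pvA_eq_layers, pvB_eq_map_dec, pvLayers_eq_map_dec]
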